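-- pv_equiv track=rewrite | github.com/neillydev/filewalk | file_walker.py | find_string_spans
-- ===== SOURCE A (Python) =====
-- from typing import Dict, List, Optional, Set, Tuple
--
-- STRING_OPENERS = ("'", '"', "`")
--
-- def find_string_spans(code: str) -> List[Tuple[int, int, str]]:
--     spans: List[Tuple[int, int, str]] = []
--     i, n = 0, len(code)
--     while i < n:
--         ch = code[i]
--         if ch in STRING_OPENERS:
--             q = ch
--             start = i
--             i += 1
--             while i < n:
--                 c = code[i]
--                 if c == "\\":
--                     i += 2
--                     continue
--                 if q == "`" and c == "$" and i + 1 < n and code[i + 1] == "{":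
--                     i += 2
--                     depth = 1
--                     while i < n and depth > 0:
--                         if code[i] == "\\":
--                             i += 2
--                             continue
--                         if code[i] == "{":
--                             depth += 1
--                         elif code[i] == "}":
--                             depth -= 1
--                         i += 1
--                     continue
--                 if c == q:
--                     spans.append((start, i + 1, q))
--                     i += 1
--                     break
--                 i += 1
--             continue
--         if ch == "/" and i + 1 < n:
--             nxt = code[i + 1]
--             if nxt == "/":
--                 i += 2
--                 while i < n and code[i] not in ("\n", "\r"):
--                     i += 1
--                 continue
--             if nxt == "*":
--                 i += 2
--                 while i + 1 < n and not (code[i] == "*" and code[i + 1] == "/"):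
--                     i += 1
--                 i += 2
--                 continue
--         i += 1
--     return spans
-- ===== SOURCE B (Python) =====
-- from typing import Dict, List, Optional, Set, Tuple
--
-- CODE, STR, INTERP, LINE, BLOCK = range(5)
--
-- def find_string_spans(code: str) -> List[Tuple[int, int, str]]:
--     spans: List[Tuple[int, int, str]] = []
--     i, n = 0, len(code)
--     mode = CODE
--     q = ""
--     start = 0
--     depth = 0
--     while i < n:
--         c = code[i]
--         if mode == CODE:
--             if c in ("'", '"', "`"):
--                 mode, q, start = STR, c, i
--                 i += 1
--             elif c == "/" and i + 1 < n and code[i + 1] == "/":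
--                 mode = LINE
--                 i += 2
--             elif c == "/" and i + 1 < n and code[i + 1] == "*":
--                 mode = BLOCK
--                 i += 2
--             else:
--                 i += 1
--         elif mode == STR:
--             if c == "\\":
--                 i += 2
--             elif q == "`" and c == "$" and i + 1 < n and code[i + 1] == "{":
--                 mode = INTERP
--                 depth = 1
--                 i += 2
--             elif c == q:
--                 spans.append((start, i + 1, q))
--                 mode = CODE
--                 i += 1
--             else:
--                 i += 1
--         elif mode == INTERP:
--             if c == "\\":
--                 i += 2
--             else:
--                 if c == "{":
--                     depth += 1
--                 elif c == "}":
--                     depth -= 1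
--                 i += 1
--                 if depth == 0:
--                     mode = STR
--         elif mode == LINE:
--             if c in ("\n", "\r"):
--                 mode = CODE
--             else:
--                 i += 1
--         else:  # BLOCK
--             if i + 1 < n and c == "*" and code[i + 1] == "/":
--                 mode = CODE
--                 i += 2
--             else:
--                 i += 1
--     return spans
-- ===== Notes on version B (the rewrite author's own statement) =====
-- stated objective: alternative
-- what changed: Replaced A's nested while-loops (inner string scan, ${}-interpolation scan, line/block comment scans inside the main loop) by a single flat while loop driven by an explicit mode variable (CODE/STR/INTERP/LINE/BLOCK) with carried quote, start and brace-depth state.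
import Mathlib
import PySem

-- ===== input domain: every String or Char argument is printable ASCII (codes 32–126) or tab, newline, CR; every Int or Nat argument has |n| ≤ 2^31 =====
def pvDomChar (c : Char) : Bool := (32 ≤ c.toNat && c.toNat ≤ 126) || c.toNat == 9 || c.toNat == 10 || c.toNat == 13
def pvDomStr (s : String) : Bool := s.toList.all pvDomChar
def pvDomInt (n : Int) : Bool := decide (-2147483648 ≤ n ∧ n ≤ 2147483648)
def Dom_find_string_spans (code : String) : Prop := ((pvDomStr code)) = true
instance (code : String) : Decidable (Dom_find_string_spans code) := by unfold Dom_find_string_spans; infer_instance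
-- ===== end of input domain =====

-- B rewrites A's nested scanning loops as one flat state-machine loop; return values agree (alternative decomposition, no speed claim).
-- Every while loop is ported as structural recursion on a fuel argument; the fuel bound is a totalization device only
-- (each loop advances the index, so a fuel of n, resp. 2n+1 for B's single loop, is never exhausted before the loop's own exit test).

-- ===== PORT A =====
-- Python's `depth += 1 / depth -= 1` update on one character (shared by both ports).
def newDepth (c : Char) (depth : Int) : Int :=
  if c = '{' then depth + 1 else if c = '}' then depth - 1 else depth

-- A's innermost `${ … }` loop (template interpolation, brace-depth counting).
def aInterp (cs : List Char) (n : Nat) : Nat → Nat → Int → Nat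
  | 0, i, _ => i
  | fuel+1, i, depth =>
    if i < n ∧ 0 < depth then
      if cs.getD i ' ' = '\\' then aInterp cs n fuel (i+2) depth
      else aInterp cs n fuel (i+1) (newDepth (cs.getD i ' ') depth)
    else i

-- A's inner string-scanning loop; returns the (optional) closed span (start, end) and the final index.
def aStr (cs : List Char) (n : Nat) : Nat → Char → Nat → Nat → Option (Nat × Nat) × Nat
  | 0, _, _, i => (none, i)
  | fuel+1, q, start, i =>
    if i < n then
      if cs.getD i ' ' = '\\' then aStr cs n fuel q start (i+2)
      else if q = '`' ∧ cs.getD i ' ' = '$' ∧ i+1 < n ∧ cs.getD (i+1) ' ' = '{' then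
        aStr cs n fuel q start (aInterp cs n n (i+2) 1)
      else if cs.getD i ' ' = q then (some (start, i+1), i+1)
      else aStr cs n fuel q start (i+1)
    else (none, i)

-- A's line-comment loop.
def aLine (cs : List Char) (n : Nat) : Nat → Nat → Nat
  | 0, i => i
  | fuel+1, i =>
    if i < n ∧ ¬ (cs.getD i ' ' = '\n' ∨ cs.getD i ' ' = '\r') then aLine cs n fuel (i+1) else i

-- A's block-comment loop (including the trailing `i += 2` overshoot).
def aBlock (cs : List Char) (n : Nat) : Nat → Nat → Nat
  | 0, i => i + 2
  | fuel+1, i =>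
    if i + 1 < n then
      if cs.getD i ' ' = '*' ∧ cs.getD (i+1) ' ' = '/' then i + 2
      else aBlock cs n fuel (i+1)
    else i + 2

-- the span appended for a closed string (empty list when the string is unterminated)
def spanOut (q : Char) (o : Option (Nat × Nat)) : List (Int × Int × String) :=
  match o with
  | some (s, e) => [((s : Int), (e : Int), String.mk [q])]
  | none => []

-- A's outer while loop.
def aMain (cs : List Char) (n : Nat) : Nat → Nat → List (Int × Int × String) → List (Int × Int × String)
  | 0, _, spans => spans
  | fuel+1, i, spans =>
    if i < n then
      if cs.getD i ' ' = '\'' ∨ cs.getD i ' ' = '"' ∨ cs.getD i ' ' = '`' then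
        let r := aStr cs n n (cs.getD i ' ') i (i+1)
        aMain cs n fuel r.2 (spans ++ spanOut (cs.getD i ' ') r.1)
      else if cs.getD i ' ' = '/' ∧ i+1 < n ∧ cs.getD (i+1) ' ' = '/' then
        aMain cs n fuel (aLine cs n n (i+2)) spans
      else if cs.getD i ' ' = '/' ∧ i+1 < n ∧ cs.getD (i+1) ' ' = '*' then
        aMain cs n fuel (aBlock cs n n (i+2)) spans
      else aMain cs n fuel (i+1) spans
    else spans

def find_string_spans (code : String) : List (Int × Int × String) :=
  aMain code.toList code.toList.length code.toList.length 0 []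

-- ===== PORT B =====
inductive PMode where
  | code | str | interp | line | block
deriving DecidableEq, Repr

-- B's single flat while loop, driven by the mode and the carried quote/start/depth state.
def bStep (cs : List Char) (n : Nat) : Nat → PMode → Char → Nat → Int → Nat →
    List (Int × Int × String) → List (Int × Int × String)
  | 0, _, _, _, _, _, spans => spans
  | fuel+1, mode, q, start, depth, i, spans =>
    if i < n then
      match mode with
      | .code =>
        if cs.getD i ' ' = '\'' ∨ cs.getD i ' ' = '"' ∨ cs.getD i ' ' = '`' then
          bStep cs n fuel .str (cs.getD i ' ') i depth (i+1) spans
        else if cs.getD i ' ' = '/' ∧ i+1 < n ∧ cs.getD (i+1) ' ' = '/' then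
          bStep cs n fuel .line q start depth (i+2) spans
        else if cs.getD i ' ' = '/' ∧ i+1 < n ∧ cs.getD (i+1) ' ' = '*' then
          bStep cs n fuel .block q start depth (i+2) spans
        else bStep cs n fuel .code q start depth (i+1) spans
      | .str =>
        if cs.getD i ' ' = '\\' then bStep cs n fuel .str q start depth (i+2) spans
        else if q = '`' ∧ cs.getD i ' ' = '$' ∧ i+1 < n ∧ cs.getD (i+1) ' ' = '{' then
          bStep cs n fuel .interp q start 1 (i+2) spans
        else if cs.getD i ' ' = q then
          bStep cs n fuel .code q start depth (i+1)
            (spans ++ [((start : Int), ((i+1 : Nat) : Int), String.mk [q])])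
        else bStep cs n fuel .str q start depth (i+1) spans
      | .interp =>
        if cs.getD i ' ' = '\\' then bStep cs n fuel .interp q start depth (i+2) spans
        else
          if newDepth (cs.getD i ' ') depth = 0 then
            bStep cs n fuel .str q start (newDepth (cs.getD i ' ') depth) (i+1) spans
          else bStep cs n fuel .interp q start (newDepth (cs.getD i ' ') depth) (i+1) spans
      | .line =>
        if cs.getD i ' ' = '\n' ∨ cs.getD i ' ' = '\r' then bStep cs n fuel .code q start depth i spans
        else bStep cs n fuel .line q start depth (i+1) spans
      | .block =>
        if i+1 < n ∧ cs.getD i ' ' = '*' ∧ cs.getD (i+1) ' ' = '/' then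
          bStep cs n fuel .code q start depth (i+2) spans
        else bStep cs n fuel .block q start depth (i+1) spans
    else spans

def find_string_spans_alt (code : String) : List (Int × Int × String) :=
  bStep code.toList code.toList.length (2 * code.toList.length + 1) .code ' ' 0 0 0 []

-- ===== PRECONDITION & SPEC =====
def Spec_find_string_spans (code : String) (out : List (Int × Int × String)) : Prop := out = find_string_spans_alt code
instance (code : String) (out : List (Int × Int × String)) : Decidable (Spec_find_string_spans code out) := by unfold Spec_find_string_spans; infer_instance

-- ===== CLAIM (what is proved, stated in full; the proofs are below) =====
def Claim_equal_find_string_spans : Prop := ∀ (code : String), Dom_find_string_spans code → Spec_find_string_spans code (find_string_spans code)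

-- ===== LEMMAS AND PROOFS =====

-- the extra fuel unit PMode.line needs (it hands the terminating newline back to CODE without advancing)
def brank : PMode → Nat
  | .line => 1
  | _ => 0

theorem bStep_stop (cs : List Char) (n : Nat) (f : Nat) (mode : PMode) (q : Char) (s : Nat)
    (d : Int) (i : Nat) (sp : List (Int × Int × String)) (hi : ¬ i < n) :
    bStep cs n f mode q s d i sp = sp := by
  cases f with
  | zero => rfl
  | succ f => cases mode <;> (rw [bStep]; simp [hi])

theorem aInterp_stop (cs : List Char) (n : Nat) (f i : Nat) (d : Int)
    (h : ¬ (i < n ∧ 0 < d)) : aInterp cs n f i d = i := by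
  cases f with
  | zero => rfl
  | succ f => rw [aInterp]; simp only [if_neg h]

theorem aStr_stop (cs : List Char) (n : Nat) (f : Nat) (q : Char) (s i : Nat)
    (hi : ¬ i < n) : aStr cs n f q s i = (none, i) := by
  cases f with
  | zero => rfl
  | succ f => rw [aStr]; simp only [if_neg hi]

theorem aLine_stop (cs : List Char) (n : Nat) (f i : Nat)
    (h : ¬ (i < n ∧ ¬ (cs.getD i ' ' = '\n' ∨ cs.getD i ' ' = '\r'))) : aLine cs n f i = i := by
  cases f with
  | zero => rfl
  | succ f => rw [aLine]; simp only [if_neg h]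

theorem aBlock_stop (cs : List Char) (n : Nat) (f i : Nat)
    (h : ¬ i + 1 < n) : aBlock cs n f i = i + 2 := by
  cases f with
  | zero => rfl
  | succ f => rw [aBlock]; simp only [if_neg h]

theorem aInterp_ge (cs : List Char) (n : Nat) (f i : Nat) (d : Int) :
    i ≤ aInterp cs n f i d := by
  induction f generalizing i d with
  | zero => simp [aInterp]
  | succ f ih =>
    rw [aInterp]
    split_ifs with h1 h2
    · exact le_trans (by omega) (ih (i+2) d)
    · exact le_trans (by omega) (ih (i+1) _)
    · exact le_refl i

theorem aStr_ge (cs : List Char) (n f : Nat) (q : Char) (s i : Nat) :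
    i ≤ (aStr cs n f q s i).2 := by
  induction f generalizing i with
  | zero => simp [aStr]
  | succ f ih =>
    rw [aStr]
    split_ifs with h1 h2 h3 h4
    · exact le_trans (by omega) (ih (i+2))
    · exact le_trans (le_trans (by omega) (aInterp_ge cs n n (i+2) 1)) (ih _)
    · simp
    · exact le_trans (by omega) (ih (i+1))
    · simp

theorem aLine_ge (cs : List Char) (n f i : Nat) : i ≤ aLine cs n f i := by
  induction f generalizing i with
  | zero => simp [aLine]
  | succ f ih =>
    rw [aLine]
    split_ifs with h1
    · exact le_trans (by omega) (ih (i+1))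
    · exact le_refl i

theorem aBlock_ge (cs : List Char) (n f i : Nat) : i ≤ aBlock cs n f i := by
  induction f generalizing i with
  | zero => simp [aBlock]
  | succ f ih =>
    rw [aBlock]
    split_ifs with h1 h2
    · omega
    · exact le_trans (by omega) (ih (i+1))
    · omega

-- B's loop ignores the fuel as long as enough is left (two units per remaining character, plus one in LINE mode).
theorem bStep_irrel (cs : List Char) (n : Nat) (f1 : Nat) :
    ∀ (f2 : Nat) (mode : PMode) (q : Char) (s : Nat) (d : Int) (i : Nat)
      (sp : List (Int × Int × String)),
      2 * (n - i) + brank mode ≤ f1 → 2 * (n - i) + brank mode ≤ f2 →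
      bStep cs n f1 mode q s d i sp = bStep cs n f2 mode q s d i sp := by
  induction f1 with
  | zero =>
    intro f2 mode q s d i sp h1 h2
    have hi : ¬ i < n := by by_contra hc; simp [brank] at h1; omega
    rw [bStep_stop cs n 0 mode q s d i sp hi, bStep_stop cs n f2 mode q s d i sp hi]
  | succ f1 ih =>
    intro f2 mode q s d i sp h1 h2
    by_cases hi : i < n
    · obtain ⟨f2', rfl⟩ : ∃ f2', f2 = f2' + 1 := by
        cases f2 with
        | zero => exfalso; simp [brank] at h2; omega
        | succ m => exact ⟨m, rfl⟩
      cases mode <;>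
        (simp only [brank] at h1 h2
         rw [bStep, bStep]
         simp only [if_pos hi]
         split_ifs <;> apply ih <;> simp [brank] <;> omega)
    · rw [bStep_stop cs n _ mode q s d i sp hi, bStep_stop cs n f2 mode q s d i sp hi]

-- B in LINE mode runs A's line-comment loop and returns to CODE.
theorem L_line (cs : List Char) (n : Nat) (q : Char) (s : Nat) (d : Int)
    (sp : List (Int × Int × String)) :
    ∀ (fL i fB fB' : Nat), n - i ≤ fL → 2 * (n - i) + 1 ≤ fB →
      2 * (n - aLine cs n fL i) ≤ fB' →
      bStep cs n fB .line q s d i sp = bStep cs n fB' .code q s d (aLine cs n fL i) sp := by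
  intro fL
  induction fL with
  | zero =>
    intro i fB fB' hL hB hB'
    have hi : ¬ i < n := by omega
    rw [bStep_stop cs n fB _ q s d i sp hi]
    rw [show aLine cs n 0 i = i from rfl]
    rw [bStep_stop cs n fB' _ q s d i sp hi]
  | succ fL ih =>
    intro i fB fB' hL hB hB'
    by_cases hi : i < n
    · obtain ⟨fB0, rfl⟩ : ∃ m, fB = m + 1 := by
        cases fB with
        | zero => omega
        | succ m => exact ⟨m, rfl⟩
      rw [bStep]
      simp only [if_pos hi]
      by_cases hnl : cs.getD i ' ' = '\n' ∨ cs.getD i ' ' = '\r'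
      · rw [if_pos hnl]
        have hstop : aLine cs n (fL+1) i = i := aLine_stop cs n (fL+1) i (by tauto)
        rw [hstop] at hB' ⊢
        exact bStep_irrel cs n fB0 fB' .code q s d i sp (by simp [brank]; omega) (by simp [brank]; omega)
      · rw [if_neg hnl]
        have hstep : aLine cs n (fL+1) i = aLine cs n fL (i+1) := by
          rw [aLine]; rw [if_pos ⟨hi, hnl⟩]
        rw [hstep] at hB' ⊢
        exact ih (i+1) fB0 fB' (by omega) (by omega) hB'
    · rw [bStep_stop cs n fB _ q s d i sp hi]
      rw [aLine_stop cs n (fL+1) i (by tauto)]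
      rw [bStep_stop cs n fB' _ q s d i sp hi]

-- B in BLOCK mode runs A's block-comment loop (with its i+2 overshoot) and returns to CODE.
theorem L_block (cs : List Char) (n : Nat) (q : Char) (s : Nat) (d : Int)
    (sp : List (Int × Int × String)) :
    ∀ (fBl i fB fB' : Nat), n - i ≤ fBl → 2 * (n - i) ≤ fB →
      2 * (n - aBlock cs n fBl i) ≤ fB' →
      bStep cs n fB .block q s d i sp = bStep cs n fB' .code q s d (aBlock cs n fBl i) sp := by
  intro fBl
  induction fBl with
  | zero =>
    intro i fB fB' hL hB hB'
    have hi : ¬ i < n := by omega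
    rw [bStep_stop cs n fB _ q s d i sp hi]
    rw [show aBlock cs n 0 i = i + 2 from rfl]
    rw [bStep_stop cs n fB' _ q s d (i+2) sp (by omega)]
  | succ fBl ih =>
    intro i fB fB' hL hB hB'
    by_cases hi : i < n
    · obtain ⟨fB0, rfl⟩ : ∃ m, fB = m + 1 := by
        cases fB with
        | zero => omega
        | succ m => exact ⟨m, rfl⟩
      rw [bStep]
      simp only [if_pos hi]
      by_cases h1 : i + 1 < n
      · by_cases hterm : cs.getD i ' ' = '*' ∧ cs.getD (i+1) ' ' = '/'
        · rw [if_pos ⟨h1, hterm.1, hterm.2⟩]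
          have hstop : aBlock cs n (fBl+1) i = i + 2 := by
            rw [aBlock]; rw [if_pos h1, if_pos hterm]
          rw [hstop] at hB' ⊢
          exact bStep_irrel cs n fB0 fB' .code q s d (i+2) sp (by simp [brank]; omega) (by simp [brank]; omega)
        · rw [if_neg (by tauto)]
          have hstep : aBlock cs n (fBl+1) i = aBlock cs n fBl (i+1) := by
            rw [aBlock]; rw [if_pos h1, if_neg hterm]
          rw [hstep] at hB' ⊢
          exact ih (i+1) fB0 fB' (by omega) (by omega) hB'
      · rw [if_neg (by tauto)]
        rw [aBlock_stop cs n (fBl+1) i h1]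
        rw [bStep_stop cs n fB0 _ q s d (i+1) sp (by omega)]
        rw [bStep_stop cs n fB' _ q s d (i+2) sp (by omega)]
    · rw [bStep_stop cs n fB _ q s d i sp hi]
      rw [aBlock_stop cs n (fBl+1) i (by omega)]
      rw [bStep_stop cs n fB' _ q s d (i+2) sp (by omega)]

-- B in INTERP mode runs A's `${ … }` loop and returns to STRING (with depth 0).
theorem L_interp (cs : List Char) (n : Nat) (q : Char) (s : Nat)
    (sp : List (Int × Int × String)) :
    ∀ (fI i fB fB' : Nat) (d : Int), 0 < d → n - i ≤ fI → 2 * (n - i) ≤ fB →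
      2 * (n - aInterp cs n fI i d) ≤ fB' →
      bStep cs n fB .interp q s d i sp = bStep cs n fB' .str q s 0 (aInterp cs n fI i d) sp := by
  intro fI
  induction fI with
  | zero =>
    intro i fB fB' d hd hL hB hB'
    have hi : ¬ i < n := by omega
    rw [bStep_stop cs n fB _ q s d i sp hi]
    rw [show aInterp cs n 0 i d = i from rfl]
    rw [bStep_stop cs n fB' _ q s 0 i sp hi]
  | succ fI ih =>
    intro i fB fB' d hd hL hB hB'
    by_cases hi : i < n
    · obtain ⟨fB0, rfl⟩ : ∃ m, fB = m + 1 := by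
        cases fB with
        | zero => omega
        | succ m => exact ⟨m, rfl⟩
      rw [bStep]
      simp only [if_pos hi]
      by_cases hbs : cs.getD i ' ' = '\\'
      · rw [if_pos hbs]
        have hstep : aInterp cs n (fI+1) i d = aInterp cs n fI (i+2) d := by
          rw [aInterp]; rw [if_pos ⟨hi, hd⟩, if_pos hbs]
        rw [hstep] at hB' ⊢
        exact ih (i+2) fB0 fB' d hd (by omega) (by omega) hB'
      · rw [if_neg hbs]
        have hstep : aInterp cs n (fI+1) i d = aInterp cs n fI (i+1) (newDepth (cs.getD i ' ') d) := by
          rw [aInterp]; rw [if_pos ⟨hi, hd⟩, if_neg hbs]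
        rw [hstep] at hB' ⊢
        by_cases hz : newDepth (cs.getD i ' ') d = 0
        · rw [if_pos hz]
          rw [aInterp_stop cs n fI (i+1) _ (by rw [hz]; simp)] at hB' ⊢
          rw [hz]
          exact bStep_irrel cs n fB0 fB' .str q s 0 (i+1) sp (by simp [brank]; omega) (by simp [brank]; omega)
        · rw [if_neg hz]
          have hpos : 0 < newDepth (cs.getD i ' ') d := by
            unfold newDepth at hz ⊢
            split_ifs at hz ⊢ <;> omega
          exact ih (i+1) fB0 fB' _ hpos (by omega) (by omega) hB'
    · rw [bStep_stop cs n fB _ q s d i sp hi]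
      rw [aInterp_stop cs n (fI+1) i d (by tauto)]
      rw [bStep_stop cs n fB' _ q s 0 i sp hi]

-- joint invariant: in CODE mode B runs A's outer loop; in STRING mode B runs A's inner string loop
-- and then A's outer loop from where that loop stopped.
theorem mainLemma (cs : List Char) (n : Nat) : ∀ (k i : Nat), n - i ≤ k →
    (∀ (fB fA : Nat) (q : Char) (s : Nat) (d : Int) (sp : List (Int × Int × String)),
        2 * (n - i) ≤ fB → n - i ≤ fA →
        bStep cs n fB .code q s d i sp = aMain cs n fA i sp) ∧
    (∀ (fB fS fA : Nat) (q : Char) (s : Nat) (d : Int) (sp : List (Int × Int × String)),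
        2 * (n - i) ≤ fB → n - i ≤ fS → n - (aStr cs n fS q s i).2 ≤ fA →
        bStep cs n fB .str q s d i sp =
          aMain cs n fA (aStr cs n fS q s i).2 (sp ++ spanOut q (aStr cs n fS q s i).1)) := by
  intro k
  induction k with
  | zero =>
    intro i hk
    have hi : ¬ i < n := by omega
    constructor
    · intro fB fA q s d sp hB hA
      rw [bStep_stop cs n fB _ q s d i sp hi]
      cases fA with
      | zero => rfl
      | succ m => rw [aMain]; simp only [if_neg hi]
    · intro fB fS fA q s d sp hB hS hA
      rw [bStep_stop cs n fB _ q s d i sp hi]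
      rw [aStr_stop cs n fS q s i hi]
      simp only [spanOut, List.append_nil]
      cases fA with
      | zero => rfl
      | succ m => rw [aMain]; simp only [if_neg hi]
  | succ k IH =>
    intro i hk
    by_cases hi : i < n
    · constructor
      · intro fB fA q s d sp hB hA
        obtain ⟨b, rfl⟩ : ∃ m, fB = m + 1 := by cases fB with | zero => omega | succ m => exact ⟨m, rfl⟩
        obtain ⟨a, rfl⟩ : ∃ m, fA = m + 1 := by cases fA with | zero => omega | succ m => exact ⟨m, rfl⟩
        rw [bStep, aMain]
        simp only [if_pos hi]
        by_cases hop : cs.getD i ' ' = '\'' ∨ cs.getD i ' ' = '"' ∨ cs.getD i ' ' = '`'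
        · rw [if_pos hop, if_pos hop]
          have hge := aStr_ge cs n n (cs.getD i ' ') i (i+1)
          exact (IH (i+1) (by omega)).2 b n a _ _ d sp (by omega) (by omega) (by omega)
        · rw [if_neg hop, if_neg hop]
          by_cases hl : cs.getD i ' ' = '/' ∧ i+1 < n ∧ cs.getD (i+1) ' ' = '/'
          · rw [if_pos hl, if_pos hl]
            have hge := aLine_ge cs n n (i+2)
            rw [L_line cs n q s d sp n (i+2) b b (by omega) (by omega) (by omega)]
            exact (IH (aLine cs n n (i+2)) (by omega)).1 b a q s d sp (by omega) (by omega)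
          · rw [if_neg hl, if_neg hl]
            by_cases hb : cs.getD i ' ' = '/' ∧ i+1 < n ∧ cs.getD (i+1) ' ' = '*'
            · rw [if_pos hb, if_pos hb]
              have hge := aBlock_ge cs n n (i+2)
              rw [L_block cs n q s d sp n (i+2) b b (by omega) (by omega) (by omega)]
              exact (IH (aBlock cs n n (i+2)) (by omega)).1 b a q s d sp (by omega) (by omega)
            · rw [if_neg hb, if_neg hb]
              exact (IH (i+1) (by omega)).1 b a q s d sp (by omega) (by omega)
      · intro fB fS fA q s d sp hB hS hA
        obtain ⟨b, rfl⟩ : ∃ m, fB = m + 1 := by cases fB with | zero => omega | succ m => exact ⟨m, rfl⟩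
        obtain ⟨s0, rfl⟩ : ∃ m, fS = m + 1 := by cases fS with | zero => omega | succ m => exact ⟨m, rfl⟩
        rw [bStep]
        simp only [if_pos hi]
        by_cases hbs : cs.getD i ' ' = '\\'
        · rw [if_pos hbs]
          have hstep : aStr cs n (s0+1) q s i = aStr cs n s0 q s (i+2) := by
            rw [aStr]; rw [if_pos hi, if_pos hbs]
          rw [hstep] at hA ⊢
          exact (IH (i+2) (by omega)).2 b s0 fA q s d sp (by omega) (by omega) hA
        · rw [if_neg hbs]
          by_cases ht : q = '`' ∧ cs.getD i ' ' = '$' ∧ i+1 < n ∧ cs.getD (i+1) ' ' = '{'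
          · rw [if_pos ht]
            have hstep : aStr cs n (s0+1) q s i = aStr cs n s0 q s (aInterp cs n n (i+2) 1) := by
              rw [aStr]; rw [if_pos hi, if_neg hbs, if_pos ht]
            rw [hstep] at hA ⊢
            have hge := aInterp_ge cs n n (i+2) 1
            rw [L_interp cs n q s sp n (i+2) b b 1 (by omega) (by omega) (by omega) (by omega)]
            exact (IH (aInterp cs n n (i+2) 1) (by omega)).2 b s0 fA q s 0 sp (by omega) (by omega) hA
          · rw [if_neg ht]
            by_cases hq : cs.getD i ' ' = q
            · rw [if_pos hq]
              have hstep : aStr cs n (s0+1) q s i = (some (s, i+1), i+1) := by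
                rw [aStr]; rw [if_pos hi, if_neg hbs, if_neg ht, if_pos hq]
              rw [hstep] at hA ⊢
              rw [(IH (i+1) (by omega)).1 b fA q s d _ (by omega) (by simpa using hA)]
              simp [spanOut]
            · rw [if_neg hq]
              have hstep : aStr cs n (s0+1) q s i = aStr cs n s0 q s (i+1) := by
                rw [aStr]; rw [if_pos hi, if_neg hbs, if_neg ht, if_neg hq]
              rw [hstep] at hA ⊢
              exact (IH (i+1) (by omega)).2 b s0 fA q s d sp (by omega) (by omega) hA
    · constructor
      · intro fB fA q s d sp hB hA
        rw [bStep_stop cs n fB _ q s d i sp hi]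
        cases fA with
        | zero => rfl
        | succ m => rw [aMain]; simp only [if_neg hi]
      · intro fB fS fA q s d sp hB hS hA
        rw [bStep_stop cs n fB _ q s d i sp hi]
        rw [aStr_stop cs n fS q s i hi]
        simp only [spanOut, List.append_nil]
        cases fA with
        | zero => rfl
        | succ m => rw [aMain]; simp only [if_neg hi]

-- ===== VERDICT (by name: the statement is the Claim_ definition above) =====
theorem find_string_spans_spec : Claim_equal_find_string_spans := by
  intro code _
  unfold Spec_find_string_spans find_string_spans find_string_spans_alt
  exact ((mainLemma code.toList code.toList.length code.toList.length 0 (by omega)).1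
    (2 * code.toList.length + 1) code.toList.length ' ' 0 0 [] (by omega) (by omega)).symm
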